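-- pv_equiv track=rewrite | github.com/vnc10/redes1 | apsredes1.py | converteDecimal
-- ===== SOURCE A (Python) =====
-- def converteDecimal(Ip):
--     ipDecimal = []
--     for i in range(4):
--         n = Ip[i]
--         decimal = 0
--         n = n[::-1]
--         tam = len(n)
--         for i in range(tam):
--             if n[i] == "1":
--                 decimal = decimal + 2**i
--         ipDecimal.append(decimal)
--     return ipDecimal
-- ===== SOURCE B (Python) =====
-- def converteDecimal(Ip):
--     ipDecimal = []
--     for octeto in Ip[:4]:
--         decimal = 0
--         for c in octeto:
--             decimal = decimal * 2 + (1 if c == "1" else 0)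
--         ipDecimal.append(decimal)
--     return ipDecimal
-- ===== Notes on version B (the rewrite author's own statement) =====
-- stated objective: simpler
-- what changed: Replaces A's string reversal, index loop and 2**i exponentiation with a single left-to-right Horner multiply-accumulate over each of the first four octets.
import Mathlib
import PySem

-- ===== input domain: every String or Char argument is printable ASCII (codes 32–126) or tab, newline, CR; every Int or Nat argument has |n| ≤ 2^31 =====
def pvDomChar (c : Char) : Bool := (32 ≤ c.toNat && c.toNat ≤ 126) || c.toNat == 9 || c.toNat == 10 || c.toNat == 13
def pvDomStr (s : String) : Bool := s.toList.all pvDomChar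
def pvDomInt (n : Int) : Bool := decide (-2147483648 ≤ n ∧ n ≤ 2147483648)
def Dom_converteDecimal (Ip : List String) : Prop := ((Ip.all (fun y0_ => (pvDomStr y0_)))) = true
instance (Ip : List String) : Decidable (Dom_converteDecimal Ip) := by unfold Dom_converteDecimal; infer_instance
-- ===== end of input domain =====

-- B replaces A's reverse-and-2**i accumulation with a left-to-right Horner pass over each octet (simpler, no reversal or exponentiation).

-- ===== PORT A =====
-- inner body of A's loop for one octet: reverse the string, then sum 2**i over the '1' positions
def pvInnerA (s : String) : Int :=
  let n : String := (PySem.Str.slice? s none none (-1)).getD ""   -- n = n[::-1] (the slice never fails)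
  let tam : Int := PySem.Str.len n
  (PySem.List.pyRange 0 tam 1).foldl
    (fun decimal i =>
      if PySem.Str.pyGet? n i = some '1' then decimal + 2 ^ i.toNat else decimal) 0

def converteDecimal (Ip : List String) : List Int :=
  (PySem.List.pyRange 0 4 1).foldl
    (fun ipDecimal i => ipDecimal ++ [pvInnerA (PySem.List.pyGetD Ip i "")]) []
  -- Ip[i]: in range under Pre_ (Python raises IndexError when len(Ip) < 4)

-- ===== PORT B =====
-- Horner pass: decimal = decimal*2 + (1 if c == "1" else 0)
def pvHornerB (s : String) : Int :=
  s.toList.foldl (fun decimal c => decimal * 2 + (if c = '1' then 1 else 0)) 0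

def converteDecimal_alt (Ip : List String) : List Int :=
  (PySem.List.slice Ip none (some 4)).foldl
    (fun ipDecimal octeto => ipDecimal ++ [pvHornerB octeto]) []

-- ===== PRECONDITION & SPEC =====
-- Pre_ excludes lists with fewer than 4 elements, on which A raises IndexError at Ip[i].
def Pre_converteDecimal (Ip : List String) : Prop := 4 ≤ Ip.length
instance (Ip : List String) : Decidable (Pre_converteDecimal Ip) := by unfold Pre_converteDecimal; infer_instance
def pvWitness_converteDecimal : List String := ["0", "1", "10", "11"]

def Spec_converteDecimal (Ip : List String) (out : List Int) : Prop := out = converteDecimal_alt Ip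
instance (Ip : List String) (out : List Int) : Decidable (Spec_converteDecimal Ip out) := by unfold Spec_converteDecimal; infer_instance

-- ===== CLAIM (what is proved, stated in full; the proofs are below) =====
def Claim_equal_converteDecimal : Prop := ∀ (Ip : List String), Dom_converteDecimal Ip → Pre_converteDecimal Ip → Spec_converteDecimal Ip (converteDecimal Ip)

-- ===== LEMMAS AND PROOFS =====

-- little-endian value of a bit string: index i carries weight 2^i
def pvBitsum : List Char → Int
  | [] => 0
  | c :: t => (if c = '1' then 1 else 0) + 2 * pvBitsum t

lemma pvBitsum_append (r : List Char) (c : Char) :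
    pvBitsum (r ++ [c]) = pvBitsum r + (if c = '1' then 1 else 0) * 2 ^ r.length := by
  induction r with
  | nil => simp [pvBitsum]
  | cons a t ih => simp [pvBitsum, ih, pow_succ]; split_ifs <;> ring

lemma pvLoop_gen (n : String) (l : List Char) (j : Nat) (acc : Int)
    (hl : n.toList.drop j = l) :
    (PySem.List.pyRange (j : Int) ((j + l.length : Nat) : Int) 1).foldl
      (fun decimal i =>
        if PySem.Str.pyGet? n i = some '1' then decimal + 2 ^ i.toNat else decimal) acc
    = acc + 2 ^ j * pvBitsum l := by
  induction l generalizing j acc with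
  | nil => simp [PySem.List.pyRange_one_eq_nil, pvBitsum]
  | cons c t ih =>
    have hlt : (j : Int) < ((j + (c :: t).length : Nat) : Int) := by
      simp only [List.length_cons]
      push_cast
      omega
    rw [PySem.List.pyRange_one_cons hlt, List.foldl_cons]
    have hget : PySem.Str.pyGet? n (j : Int) = some c := by
      rw [PySem.Str.pyGet?_natCast]
      have := congrArg (fun xs => xs[0]?) hl
      simpa [List.getElem?_drop] using this
    have hdrop : n.toList.drop (j + 1) = t := by
      have := congrArg List.tail hl
      simpa [List.tail_drop] using this
    have hcast : ((j : Int) + 1) = ((j + 1 : Nat) : Int) := by push_cast; ring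
    have hcast2 : ((j + (c :: t).length : Nat) : Int) = (((j + 1) + t.length : Nat) : Int) := by
      push_cast; simp; ring
    rw [hget]
    simp only [Option.some.injEq]
    rw [hcast, hcast2]
    rw [ih (j + 1) _ hdrop]
    simp only [Int.toNat_natCast, pvBitsum]
    split_ifs <;> rw [pow_succ] <;> ring

lemma pvInnerA_eq_bitsum (s : String) : pvInnerA s = pvBitsum s.toList.reverse := by
  unfold pvInnerA
  rw [PySem.Str.slice?_none_none_neg_one]
  simp only [Option.getD_some]
  have hlen : PySem.Str.len (String.ofList s.toList.reverse)
      = (((0 : Nat) + s.toList.reverse.length : Nat) : Int) := by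
    simp [PySem.Str.len_eq]
  rw [hlen]
  have hmain := pvLoop_gen (String.ofList s.toList.reverse) s.toList.reverse 0 0 (by simp)
  simpa using hmain

lemma pvHorner_gen (l : List Char) (a : Int) :
    l.foldl (fun decimal c => decimal * 2 + (if c = '1' then 1 else 0)) a
    = a * 2 ^ l.length + pvBitsum l.reverse := by
  induction l generalizing a with
  | nil => simp [pvBitsum]
  | cons c t ih =>
    simp only [List.foldl_cons, ih, List.length_cons, List.reverse_cons, pvBitsum_append, pow_succ, List.length_reverse]
    ring

lemma pvHornerB_eq_bitsum (s : String) : pvHornerB s = pvBitsum s.toList.reverse := by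
  unfold pvHornerB
  rw [pvHorner_gen]
  simp

lemma pvInner_eq_horner (s : String) : pvInnerA s = pvHornerB s := by
  rw [pvInnerA_eq_bitsum, pvHornerB_eq_bitsum]

-- ===== VERDICT (by name: the statement is the Claim_ definition above) =====
theorem converteDecimal_spec : Claim_equal_converteDecimal := by
  intro Ip _ hpre
  unfold Pre_converteDecimal at hpre
  unfold Spec_converteDecimal converteDecimal converteDecimal_alt
  match Ip, hpre with
  | a :: b :: c :: d :: t, _ =>
    have h4 : PySem.List.pyRange 0 4 1 = [0, 1, 2, 3] := by decide
    have hsl : PySem.List.slice (a :: b :: c :: d :: t) none (some 4) = [a, b, c, d] := by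
      have h4' : (4 : Int) = ((4 : Nat) : Int) := by norm_num
      rw [h4', PySem.List.slice_to_natCast]
      rfl
    rw [h4, hsl]
    simp only [List.foldl_cons, List.foldl_nil, List.nil_append]
    have g0 : PySem.List.pyGetD (a :: b :: c :: d :: t) 0 "" = a := by simp [pysem]
    have g1 : PySem.List.pyGetD (a :: b :: c :: d :: t) 1 "" = b := by simp [pysem]
    have g2 : PySem.List.pyGetD (a :: b :: c :: d :: t) 2 "" = c := by simp [pysem]
    have g3 : PySem.List.pyGetD (a :: b :: c :: d :: t) 3 "" = d := by simp [pysem]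
    rw [g0, g1, g2, g3]
    simp [pvInner_eq_horner]
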